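-- pv_equiv track=rewrite | github.com/laichunpongben/natural_language_processing | text_normalization_en/text_normalization.py | normalize_leading_zero
-- ===== SOURCE A (Python) =====
-- from collections import OrderedDict
--
-- def normalize_leading_zero(text, previous=None):
--     if previous:
--         if len(text) == text.count('0') and previous.isdigit():
--             return 'zero'
--
--     d = OrderedDict([
--         ('1', 'one'),
--         ('2', 'two'),
--         ('3', 'three'),
--         ('4', 'four'),
--         ('5', 'five'),
--         ('6', 'six'),
--         ('7', 'seven'),
--         ('8', 'eight'),
--         ('9', 'nine'),
--         ('0', 'o'),
--         ('-', 'sil')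
--     ])
--
--     text_ = text.replace('(', '')
--     text_ = text_.replace(')', '')
--     text_ = text_.replace(' ', '-')
--     text_ = " ".join(text_)
--     for k, v in d.items():
--         text_ = text_.replace(k, v)
--     return text_
-- ===== SOURCE B (Python) =====
-- _DIGIT_WORDS = ('o', 'one', 'two', 'three', 'four', 'five',
--                 'six', 'seven', 'eight', 'nine')
--
-- def _spell(s):
--     # One backward pass: walk the string from the end, spell each kept
--     # character (digits via an index into a word tuple), collect the words
--     # in reverse, and join once at the end.
--     rwords = []
--     for c in reversed(s):
--         if c == '(' or c == ')':
--             continue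
--         if c in '0123456789':
--             w = _DIGIT_WORDS[ord(c) - 48]
--         elif c == ' ' or c == '-':
--             w = 'sil'
--         else:
--             w = c
--         rwords.append(w)
--     return ' '.join(reversed(rwords))
--
-- def normalize_leading_zero(text, previous=None):
--     if previous and previous.isdigit() and all(c == '0' for c in text):
--         return 'zero'
--     return _spell(text)
-- ===== Notes on version B (the rewrite author's own statement) =====
-- stated objective: alternative
-- what changed: Replaced the 11 sequential whole-string str.replace passes over a space-joined copy by a single backward pass that spells each kept character (digits via an index into a word tuple), collects the words in reverse and joins once, with the leading-zero guard tested character-wise instead of comparing the length with the zero count.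
import Mathlib
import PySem

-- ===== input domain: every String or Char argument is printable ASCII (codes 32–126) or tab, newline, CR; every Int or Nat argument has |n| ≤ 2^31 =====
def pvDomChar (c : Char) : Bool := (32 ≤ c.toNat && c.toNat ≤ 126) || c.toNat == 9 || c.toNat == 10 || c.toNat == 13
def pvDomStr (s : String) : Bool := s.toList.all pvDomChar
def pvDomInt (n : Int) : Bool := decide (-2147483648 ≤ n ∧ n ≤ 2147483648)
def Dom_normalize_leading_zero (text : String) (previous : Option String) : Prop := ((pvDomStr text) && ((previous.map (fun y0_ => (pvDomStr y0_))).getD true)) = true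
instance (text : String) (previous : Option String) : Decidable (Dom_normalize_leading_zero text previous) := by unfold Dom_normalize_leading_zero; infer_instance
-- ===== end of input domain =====

-- B replaces the 11 sequential whole-string str.replace scans by one backward fold that
-- spells each character and stitches the spelled suffix with spaces (objective: alternative).

-- ===== PORT A =====
-- the OrderedDict's items, in insertion order (all keys distinct)
def nlzTable : List (String × String) :=
  [("1", "one"), ("2", "two"), ("3", "three"), ("4", "four"), ("5", "five"),
   ("6", "six"), ("7", "seven"), ("8", "eight"), ("9", "nine"), ("0", "o"), ("-", "sil")]

def nlzBody (text : String) : String :=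
  let t1 := PySem.Str.replace text "(" ""
  let t2 := PySem.Str.replace t1 ")" ""
  let t3 := PySem.Str.replace t2 " " "-"
  -- " ".join(text_) joins the CHARACTERS of text_
  let t4 := PySem.Str.join " " (t3.toList.map (fun c => String.ofList [c]))
  nlzTable.foldl (fun t kv => PySem.Str.replace t kv.1 kv.2) t4

def normalize_leading_zero (text : String) (previous : Option String) : String :=
  match previous with
  | some p =>
      if p ≠ "" then   -- Python truthiness of `previous`
        if PySem.Str.len text = (PySem.Str.count text "0" : Int) ∧ PySem.Str.strIsdigit p
        then "zero" else nlzBody text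
      else nlzBody text
  | none => nlzBody text

-- ===== PORT B =====
-- Source B's _DIGIT_WORDS tuple
def nlzDigitWords : List String :=
  ["o", "one", "two", "three", "four", "five", "six", "seven", "eight", "nine"]

-- Source B's _spell, first half: the backward pass collecting the words in reverse
-- (strings are represented as their character lists; the index ord(c)-48 is in
-- range whenever the digit test fired, so getD's default is never used)
def nlzSpell (s : List Char) : List String :=
  s.reverse.foldl (fun rwords c =>
    if c = '(' ∨ c = ')' then rwords
    else
      let w : String :=
        if c ∈ "0123456789".toList then nlzDigitWords.getD (c.toNat - 48) ""
        else if c = ' ' ∨ c = '-' then "sil"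
        else String.ofList [c]
      rwords ++ [w]) []

def normalize_leading_zero_alt (text : String) (previous : Option String) : String :=
  match previous with
  | some p =>
      if p ≠ "" ∧ PySem.Str.strIsdigit p ∧ text.toList.all (fun c => c == '0')
      then "zero" else PySem.Str.join " " (nlzSpell text.toList).reverse
  | none => PySem.Str.join " " (nlzSpell text.toList).reverse

-- ===== PRECONDITION & SPEC =====
def Spec_normalize_leading_zero (text : String) (previous : Option String) (out : String) : Prop := out = normalize_leading_zero_alt text previous
instance (text : String) (previous : Option String) (out : String) : Decidable (Spec_normalize_leading_zero text previous out) := by unfold Spec_normalize_leading_zero; infer_instance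

-- ===== CLAIM (what is proved, stated in full; the proofs are below) =====
def Claim_equal_normalize_leading_zero : Prop := ∀ (text : String) (previous : Option String), Dom_normalize_leading_zero text previous → Spec_normalize_leading_zero text previous (normalize_leading_zero text previous)

-- ===== LEMMAS AND PROOFS =====

-- single-character replacement is a flatMap over the characters
theorem nlz_go_flat (k : Char) (v : List Char) (fuel : Nat) (l acc : List Char) (h : l.length ≤ fuel) :
    PySem.Chars.replace.go [k] v fuel l acc
      = acc.reverse ++ l.flatMap (fun c => if c = k then v else [c]) := by
  induction l generalizing fuel acc with
  | nil => cases fuel <;> simp [PySem.Chars.replace.go]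
  | cons c t ih =>
      cases fuel with
      | zero => simp at h
      | succ m =>
        simp only [PySem.Chars.replace.go]
        by_cases hc : c = k
        · subst hc
          simp [List.isPrefixOf, ih _ _ (by simpa using h)]
        · simp [List.isPrefixOf, Ne.symm hc, ih _ _ (by simpa using h), hc]

theorem nlz_replace_single (s : List Char) (k : Char) (v : List Char) :
    PySem.Chars.replace s [k] v = s.flatMap (fun c => if c = k then v else [c]) := by
  simpa [PySem.Chars.replace] using nlz_go_flat k v s.length s [] le_rfl

-- counting a single character counts its occurrences
theorem nlz_count_go_single (k : Char) (fuel : Nat) (l : List Char) (acc : Nat)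
    (h : l.length ≤ fuel) :
    PySem.Chars.count.go [k] fuel l acc = acc + l.count k := by
  induction l generalizing fuel acc with
  | nil => cases fuel <;> simp [PySem.Chars.count.go]
  | cons c t ih =>
      cases fuel with
      | zero => simp at h
      | succ m =>
        simp only [PySem.Chars.count.go]
        by_cases hc : c = k
        · subst hc
          simp [List.isPrefixOf, ih _ _ (by simpa using h)]
          omega
        · simp [List.isPrefixOf, Ne.symm hc, ih _ _ (by simpa using h), hc]

theorem nlz_count_single (s : List Char) (k : Char) :
    PySem.Chars.count s [k] = s.count k := by
  simpa [PySem.Chars.count] using nlz_count_go_single k s.length s 0 le_rfl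

-- A's guard len(text)==text.count('0') says exactly: every character is '0'
theorem nlz_guard_eq (text : String) :
    (PySem.Str.len text = (PySem.Str.count text "0" : Int))
      ↔ (text.toList.all (fun c => c == '0') = true) := by
  have h0 : ("0" : String).toList = ['0'] := rfl
  rw [PySem.Str.len, PySem.Str.count, h0, nlz_count_single]
  constructor
  · intro h
    have hlen : text.toList.length = text.toList.count '0' := by exact_mod_cast h
    have := (List.count_eq_length).mp hlen.symm
    simp only [List.all_eq_true, beq_iff_eq]
    intro c hc; exact (this c hc).symm
  · intro h
    simp only [List.all_eq_true, beq_iff_eq] at h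
    have : text.toList.count '0' = text.toList.length :=
      List.count_eq_length.mpr (fun b hb => (h b hb).symm)
    exact_mod_cast this.symm

-- the cleaned character list: '(' and ')' dropped, ' ' turned into '-'
def nlzClean (cs : List Char) : List Char :=
  (cs.filter (fun c => ¬(c = '(' ∨ c = ')'))).map (fun c => if c = ' ' then '-' else c)

-- the per-character word, as characters
def nlzWordC (c : Char) : List Char :=
  if c = '1' then "one".toList else if c = '2' then "two".toList
  else if c = '3' then "three".toList else if c = '4' then "four".toList
  else if c = '5' then "five".toList else if c = '6' then "six".toList
  else if c = '7' then "seven".toList else if c = '8' then "eight".toList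
  else if c = '9' then "nine".toList else if c = '0' then "o".toList
  else if c = '-' then "sil".toList else [c]

theorem nlz_clean_eq (cs : List Char) :
    ((cs.flatMap (fun c => if c = '(' then ([] : List Char) else [c])).flatMap
        (fun c => if c = ')' then ([] : List Char) else [c])).flatMap
      (fun c => if c = ' ' then ['-'] else [c]) = nlzClean cs := by
  induction cs with
  | nil => simp [nlzClean]
  | cons c t ih =>
      by_cases h1 : c = '('
      · simp [h1, nlzClean] at ih ⊢; simpa using ih
      · by_cases h2 : c = ')'
        · simp [h2, nlzClean] at ih ⊢; simpa using ih
        · by_cases h3 : c = ' '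
          · simp [h3, nlzClean] at ih ⊢; simpa using ih
          · simp [h1, h2, h3, nlzClean] at ih ⊢; simpa using ih

-- A's replacement loop over the table, on character lists
def nlzChain (s : List Char) : List Char :=
  nlzTable.foldl (fun t kv => PySem.Chars.replace t kv.1.toList kv.2.toList) s

theorem nlzChain_flat (s : List Char) :
    nlzChain s =
      ((((((((((s.flatMap (fun c => if c = '1' then "one".toList else [c])).flatMap
        (fun c => if c = '2' then "two".toList else [c])).flatMap
        (fun c => if c = '3' then "three".toList else [c])).flatMap
        (fun c => if c = '4' then "four".toList else [c])).flatMap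
        (fun c => if c = '5' then "five".toList else [c])).flatMap
        (fun c => if c = '6' then "six".toList else [c])).flatMap
        (fun c => if c = '7' then "seven".toList else [c])).flatMap
        (fun c => if c = '8' then "eight".toList else [c])).flatMap
        (fun c => if c = '9' then "nine".toList else [c])).flatMap
        (fun c => if c = '0' then "o".toList else [c])).flatMap
        (fun c => if c = '-' then "sil".toList else [c]) := by
  simp only [nlzChain, nlzTable, List.foldl_cons, List.foldl_nil]
  rw [show ("1" : String).toList = ['1'] from rfl, show ("2" : String).toList = ['2'] from rfl,
      show ("3" : String).toList = ['3'] from rfl, show ("4" : String).toList = ['4'] from rfl,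
      show ("5" : String).toList = ['5'] from rfl, show ("6" : String).toList = ['6'] from rfl,
      show ("7" : String).toList = ['7'] from rfl, show ("8" : String).toList = ['8'] from rfl,
      show ("9" : String).toList = ['9'] from rfl, show ("0" : String).toList = ['0'] from rfl,
      show ("-" : String).toList = ['-'] from rfl]
  simp only [nlz_replace_single]

theorem nlzChain_append (a b : List Char) :
    nlzChain (a ++ b) = nlzChain a ++ nlzChain b := by
  simp [nlzChain_flat, List.flatMap_append]

theorem nlzChain_space : nlzChain [' '] = [' '] := by decide

theorem nlzChain_single (c : Char) : nlzChain [c] = nlzWordC c := by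
  by_cases h1 : c = '1'; · subst h1; decide
  by_cases h2 : c = '2'; · subst h2; decide
  by_cases h3 : c = '3'; · subst h3; decide
  by_cases h4 : c = '4'; · subst h4; decide
  by_cases h5 : c = '5'; · subst h5; decide
  by_cases h6 : c = '6'; · subst h6; decide
  by_cases h7 : c = '7'; · subst h7; decide
  by_cases h8 : c = '8'; · subst h8; decide
  by_cases h9 : c = '9'; · subst h9; decide
  by_cases h0 : c = '0'; · subst h0; decide
  by_cases hm : c = '-'; · subst hm; decide
  rw [nlzChain_flat]
  simp [nlzWordC, h1, h2, h3, h4, h5, h6, h7, h8, h9, h0, hm]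

theorem nlzChain_intercalate (l : List Char) :
    nlzChain ([' '].intercalate (l.map (fun c => [c])))
      = [' '].intercalate (l.map nlzWordC) := by
  induction l with
  | nil => simp [List.intercalate, nlzChain_flat]
  | cons c t ih =>
      cases t with
      | nil => simpa [List.intercalate] using nlzChain_single c
      | cons d u =>
          have hi : [' '].intercalate ([c] :: ([d] :: u.map (fun c => [c])))
              = [c] ++ [' '] ++ [' '].intercalate ([d] :: u.map (fun c => [c])) := by
            simp [List.intercalate, List.intersperse]
          have hi' : [' '].intercalate (nlzWordC c :: (nlzWordC d :: u.map nlzWordC))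
              = nlzWordC c ++ [' '] ++ [' '].intercalate (nlzWordC d :: u.map nlzWordC) := by
            simp [List.intercalate, List.intersperse]
          simp only [List.map_cons] at ih ⊢
          rw [hi, hi', nlzChain_append, nlzChain_append, nlzChain_single, nlzChain_space, ih]

-- A's body, as characters
theorem nlzBody_toList (text : String) :
    (nlzBody text).toList = [' '].intercalate ((nlzClean text.toList).map nlzWordC) := by
  have hdef : nlzBody text = nlzTable.foldl (fun t kv => PySem.Str.replace t kv.1 kv.2)
      (PySem.Str.join " "
        ((PySem.Str.replace (PySem.Str.replace (PySem.Str.replace text "(" "") ")" "") " " "-").toList.map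
          (fun c => String.ofList [c]))) := rfl
  rw [hdef]
  have hfold : ∀ (l : List (String × String)) (t : String),
      (l.foldl (fun t kv => PySem.Str.replace t kv.1 kv.2) t).toList
        = l.foldl (fun s kv => PySem.Chars.replace s kv.1.toList kv.2.toList) t.toList := by
    intro l
    induction l with
    | nil => intro t; rfl
    | cons kv r ih => intro t; simp [List.foldl_cons, ih, PySem.Str.toList_replace]
  rw [hfold]
  rw [show (∀ s, nlzTable.foldl (fun s kv => PySem.Chars.replace s kv.1.toList kv.2.toList) s = nlzChain s) from fun _ => rfl]
  have ht3 : (PySem.Str.replace (PySem.Str.replace (PySem.Str.replace text "(" "") ")" "") " " "-").toList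
      = nlzClean text.toList := by
    simp only [PySem.Str.toList_replace]
    rw [show ("(" : String).toList = ['('] from rfl, show (")" : String).toList = [')'] from rfl,
        show (" " : String).toList = [' '] from rfl, show ("-" : String).toList = ['-'] from rfl,
        show ("" : String).toList = [] from rfl]
    rw [nlz_replace_single, nlz_replace_single, nlz_replace_single]
    exact nlz_clean_eq text.toList
  have ht4 : (PySem.Str.join " "
      ((PySem.Str.replace (PySem.Str.replace (PySem.Str.replace text "(" "") ")" "") " " "-").toList.map
        (fun c => String.ofList [c]))).toList
      = [' '].intercalate ((nlzClean text.toList).map (fun c => [c])) := by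
    rw [PySem.Str.toList_join, ht3]
    simp [PySem.Chars.join, List.map_map, Function.comp_def]
  rw [ht4]
  exact nlzChain_intercalate _

-- B's word for one kept character, as characters: A's word after the ' '→'-' renaming
theorem nlz_word_toList (c : Char) (hp : ¬(c = '(' ∨ c = ')')) :
    (if c ∈ "0123456789".toList then nlzDigitWords.getD (c.toNat - 48) ""
     else if c = ' ' ∨ c = '-' then "sil"
     else String.ofList [c]).toList = nlzWordC (if c = ' ' then '-' else c) := by
  by_cases hd : c ∈ "0123456789".toList
  · rw [show ("0123456789" : String).toList
        = ['0','1','2','3','4','5','6','7','8','9'] from rfl] at hd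
    simp only [List.mem_cons, List.not_mem_nil, or_false] at hd
    rcases hd with h|h|h|h|h|h|h|h|h|h <;> subst h <;> decide
  · rw [if_neg hd]
    rw [show ("0123456789" : String).toList
        = ['0','1','2','3','4','5','6','7','8','9'] from rfl] at hd
    simp only [List.mem_cons, List.not_mem_nil, or_false, not_or] at hd
    obtain ⟨h0, h1, h2, h3, h4, h5, h6, h7, h8, h9⟩ := hd
    by_cases hs : c = ' '
    · subst hs; decide
    · by_cases hm : c = '-'
      · subst hm; decide
      · simp [hs, hm, nlzWordC, h0, h1, h2, h3, h4, h5, h6, h7, h8, h9]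

-- the backward pass collects exactly the words of the kept characters, reversed
theorem nlzSpell_foldl (l : List Char) (acc : List String) :
    l.foldl (fun rwords c =>
      if c = '(' ∨ c = ')' then rwords
      else
        let w : String :=
          if c ∈ "0123456789".toList then nlzDigitWords.getD (c.toNat - 48) ""
          else if c = ' ' ∨ c = '-' then "sil"
          else String.ofList [c]
        rwords ++ [w]) acc
    = acc ++ (l.filter (fun c => ¬(c = '(' ∨ c = ')'))).map (fun c =>
        if c ∈ "0123456789".toList then nlzDigitWords.getD (c.toNat - 48) ""
        else if c = ' ' ∨ c = '-' then "sil"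
        else String.ofList [c]) := by
  induction l generalizing acc with
  | nil => simp
  | cons c t ih =>
      by_cases hp : c = '(' ∨ c = ')'
      · rw [List.foldl_cons, if_pos hp, ih]
        simp
        rcases hp with h | h <;> simp [h]
      · have hp' := not_or.mp hp
        rw [List.foldl_cons, if_neg hp, ih]
        simp [hp'.1, hp'.2]

theorem nlzSpell_reverse_toList (cs : List Char) :
    ((nlzSpell cs).reverse).map String.toList = (nlzClean cs).map nlzWordC := by
  unfold nlzSpell
  rw [nlzSpell_foldl, List.nil_append, List.filter_reverse]
  simp only [List.map_reverse, List.reverse_reverse, List.map_map]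
  rw [nlzClean, List.map_map]
  refine List.map_congr_left (fun c hc => ?_)
  exact nlz_word_toList c (by simpa using (List.of_mem_filter hc))

theorem nlzBody_eq_alt (text : String) :
    nlzBody text = PySem.Str.join " " (nlzSpell text.toList).reverse := by
  have hB : (PySem.Str.join " " (nlzSpell text.toList).reverse).toList
      = [' '].intercalate ((nlzClean text.toList).map nlzWordC) := by
    rw [PySem.Str.toList_join, show (" " : String).toList = [' '] from rfl,
        PySem.Chars.join, nlzSpell_reverse_toList]
  have h := (nlzBody_toList text).trans hB.symm
  have := congrArg String.ofList h
  rwa [String.ofList_toList, String.ofList_toList] at this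

-- ===== VERDICT (by name: the statement is the Claim_ definition above) =====
theorem normalize_leading_zero_spec : Claim_equal_normalize_leading_zero := by
  intro text previous _
  have hb := nlzBody_eq_alt text
  unfold Spec_normalize_leading_zero
  cases previous with
  | none => exact hb
  | some p =>
      simp only [normalize_leading_zero, normalize_leading_zero_alt]
      by_cases hp : p ≠ ""
      · rw [if_pos hp]
        by_cases hg : PySem.Str.len text = (PySem.Str.count text "0" : Int) ∧ PySem.Str.strIsdigit p
        · rw [if_pos hg, if_pos ⟨hp, hg.2, (nlz_guard_eq text).mp hg.1⟩]
        · rw [if_neg hg, if_neg (fun ⟨h1, h2, h3⟩ => hg ⟨(nlz_guard_eq text).mpr h3, h2⟩)]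
          exact hb
      · rw [if_neg hp, if_neg (fun h => hp h.1)]
        exact hb
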